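-- pv_equiv track=rewrite | github.com/lengyan11001/lobster_online_yingshi | mcp/http_server.py | _coerce_sora_fal_duration_seconds
-- ===== SOURCE A (Python) =====
-- _SORA_FAL_DURATION_SECONDS = (4, 8, 12, 16, 20)
--
-- def _coerce_sora_fal_duration_seconds(sec: int) -> int:
--     """将秒数收敛到 fal Sora 2 允许的 duration；距离相同时取较小值。"""
--     try:
--         s = max(1, int(sec))
--     except (ValueError, TypeError, OverflowError):
--         return _SORA_FAL_DURATION_SECONDS[0]
--     if s in _SORA_FAL_DURATION_SECONDS:
--         return s
--     best = _SORA_FAL_DURATION_SECONDS[0]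
--     best_d = abs(s - best)
--     for a in _SORA_FAL_DURATION_SECONDS[1:]:
--         d = abs(s - a)
--         if d < best_d or (d == best_d and a < best):
--             best, best_d = a, d
--     return best
-- ===== SOURCE B (Python) =====
-- def _coerce_sora_fal_duration_seconds(sec: int) -> int:
--     try:
--         s = max(1, int(sec))
--     except (ValueError, TypeError, OverflowError):
--         return 4
--     # allowed durations are 4,8,...,20: snap by clamped half-down integer division
--     k = min(max((s - 3) // 4, 0), 4)
--     return 4 + 4 * k
-- ===== Notes on version B (the rewrite author's own statement) =====
-- stated objective: simpler
-- what changed: Replaces the membership test plus linear nearest-neighbour scan over the duration tuple with a closed-form clamped integer division exploiting that the allowed durations are the arithmetic progression 4,8,...,20.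
import Mathlib
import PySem

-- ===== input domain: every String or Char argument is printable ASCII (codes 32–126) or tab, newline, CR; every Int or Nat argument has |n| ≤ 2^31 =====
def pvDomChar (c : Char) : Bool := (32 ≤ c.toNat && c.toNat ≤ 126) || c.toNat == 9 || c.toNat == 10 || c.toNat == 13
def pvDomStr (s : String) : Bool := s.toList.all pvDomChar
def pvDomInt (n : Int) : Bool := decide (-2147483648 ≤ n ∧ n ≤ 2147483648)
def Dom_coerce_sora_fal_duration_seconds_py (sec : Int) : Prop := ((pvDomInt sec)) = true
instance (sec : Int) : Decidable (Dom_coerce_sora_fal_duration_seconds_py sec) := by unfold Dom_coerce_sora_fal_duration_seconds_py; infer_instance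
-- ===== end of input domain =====

-- B replaces A's linear scan over the allowed-duration tuple with a closed-form clamped
-- integer division (the durations are the arithmetic progression 4,8,...,20); objective: simpler.


-- ===== PORT A =====
-- int(sec) on an Int is the identity and cannot raise, so the except branch is dead for Int input.
def coerce_sora_fal_duration_seconds_py (sec : Int) : Int :=
  let s := max 1 sec
  if s = 4 ∨ s = 8 ∨ s = 12 ∨ s = 16 ∨ s = 20 then s
  else
    let r := [(8 : Int), 12, 16, 20].foldl
      (fun (st : Int × Int) a =>
        let d := |s - a|
        if d < st.2 ∨ (d = st.2 ∧ a < st.1) then (a, d) else st)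
      ((4 : Int), |s - 4|)
    r.1

-- ===== PORT B =====
def coerce_sora_fal_duration_seconds_py_alt (sec : Int) : Int :=
  let s := max 1 sec
  let k := min (max (PySem.Int.floordiv (s - 3) 4) 0) 4
  4 + 4 * k

-- ===== PRECONDITION & SPEC =====
def Spec_coerce_sora_fal_duration_seconds_py (sec : Int) (out : Int) : Prop := out = coerce_sora_fal_duration_seconds_py_alt sec
instance (sec : Int) (out : Int) : Decidable (Spec_coerce_sora_fal_duration_seconds_py sec out) := by unfold Spec_coerce_sora_fal_duration_seconds_py; infer_instance

-- ===== CLAIM (what is proved, stated in full; the proofs are below) =====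
def Claim_equal_coerce_sora_fal_duration_seconds_py : Prop := ∀ (sec : Int), Dom_coerce_sora_fal_duration_seconds_py sec → Spec_coerce_sora_fal_duration_seconds_py sec (coerce_sora_fal_duration_seconds_py sec)

-- ===== LEMMAS AND PROOFS =====

-- ===== VERDICT (by name: the statement is the Claim_ definition above) =====
theorem coerce_sora_fal_duration_seconds_py_spec : Claim_equal_coerce_sora_fal_duration_seconds_py := by
  intro sec _
  unfold Spec_coerce_sora_fal_duration_seconds_py
  unfold coerce_sora_fal_duration_seconds_py coerce_sora_fal_duration_seconds_py_alt
  rcases le_or_gt sec 0 with h0 | h0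
  · rw [show max 1 sec = 1 from max_eq_left (by omega)]
    decide
  · rcases le_or_gt sec 22 with h22 | h22
    · interval_cases sec <;> decide
    · rw [show max 1 sec = sec from max_eq_right (by omega)]
      rw [if_neg (by omega)]
      simp only [List.foldl_cons, List.foldl_nil,
        PySem.Int.floordiv_eq_ediv_of_pos (show (0:Int) < 4 by norm_num),
        abs_of_nonneg (show (0:Int) ≤ sec - 4 by omega),
        abs_of_nonneg (show (0:Int) ≤ sec - 8 by omega),
        abs_of_nonneg (show (0:Int) ≤ sec - 12 by omega),
        abs_of_nonneg (show (0:Int) ≤ sec - 16 by omega),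
        abs_of_nonneg (show (0:Int) ≤ sec - 20 by omega),
        max_def, min_def]
      split_ifs <;> omega
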